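-- pv_equiv track=rewrite | github.com/PoetCoderJun/video_auto_cut | web_api/services/step2.py | _line_ids_to_block_range
-- ===== SOURCE A (Python) =====
-- from typing import Any
--
-- def _format_block_range(start_id: int, end_id: int) -> str:
--     return str(start_id) if start_id == end_id else f"{start_id}-{end_id}"
--
-- def _line_ids_to_block_range(line_ids: list[int], kept_lines: list[dict[str, Any]]) -> str:
--     if not line_ids or not kept_lines:
--         return ""
--     position_by_line_id = {
--         int(item["line_id"]): index + 1 for index, item in enumerate(kept_lines)
--     }
--     positions = sorted(
--         {
--             position_by_line_id[int(line_id)]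
--             for line_id in line_ids
--             if int(line_id) in position_by_line_id
--         }
--     )
--     if not positions:
--         return ""
--     return _format_block_range(positions[0], positions[-1])
-- ===== SOURCE B (Python) =====
-- def _format_block_range(start_id: int, end_id: int) -> str:
--     return str(start_id) if start_id == end_id else f"{start_id}-{end_id}"
--
-- def _line_ids_to_block_range(line_ids, kept_lines):
--     if not line_ids or not kept_lines:
--         return ""
--     position_by_line_id = {
--         int(item["line_id"]): index + 1 for index, item in enumerate(kept_lines)
--     }
--     lo = hi = None
--     for line_id in line_ids:
--         pos = position_by_line_id.get(int(line_id))
--         if pos is None: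
--             continue
--         if lo is None or pos < lo:
--             lo = pos
--         if hi is None or pos > hi:
--             hi = pos
--     if lo is None:
--         return ""
--     return _format_block_range(lo, hi)
-- ===== Notes on version B (the rewrite author's own statement) =====
-- stated objective: simpler
-- what changed: The set-comprehension plus sorted() extraction of the extremes is replaced by a single pass over line_ids that tracks running min/max positions directly, so no set and no sort are built.
import Mathlib
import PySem

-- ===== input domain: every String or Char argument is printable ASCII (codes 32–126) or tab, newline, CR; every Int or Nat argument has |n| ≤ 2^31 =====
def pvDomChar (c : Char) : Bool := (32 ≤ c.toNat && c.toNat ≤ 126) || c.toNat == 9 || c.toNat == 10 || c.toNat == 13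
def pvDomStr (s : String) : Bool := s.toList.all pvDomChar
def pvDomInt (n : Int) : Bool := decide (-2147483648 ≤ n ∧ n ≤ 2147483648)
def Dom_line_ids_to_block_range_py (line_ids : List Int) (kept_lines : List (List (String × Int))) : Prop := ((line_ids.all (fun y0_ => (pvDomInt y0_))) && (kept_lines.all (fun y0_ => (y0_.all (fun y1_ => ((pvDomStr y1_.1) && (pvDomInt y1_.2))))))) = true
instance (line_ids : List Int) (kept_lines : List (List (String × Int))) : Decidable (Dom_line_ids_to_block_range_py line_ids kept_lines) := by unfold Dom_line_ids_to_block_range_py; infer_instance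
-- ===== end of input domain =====

-- B replaces the build-a-set-then-sort extraction of the extremes by a single running
-- min/max pass over line_ids (objective: simpler); same dict, same "" corners.


-- ===== PORT A =====
-- _format_block_range, shared helper of both Pythons
def pvFormatBlockRange (start_id end_id : Int) : String :=
  if start_id = end_id then PySem.Int.toStr start_id
  else PySem.Int.toStr start_id ++ "-" ++ PySem.Int.toStr end_id

-- the dict comprehension {int(item["line_id"]): index+1 ...}, textually identical in A and B;
-- item["line_id"] is ported as getD 0 — exact when the key is present (guaranteed by Pre_)
def pvPosDict (kept_lines : List (List (String × Int))) : PySem.Dict Int Int :=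
  (PySem.List.enumerate kept_lines).foldl
    (fun d p => d.insert ((PySem.Dict.mk p.2).getD "line_id" 0) (p.1 + 1)) PySem.Dict.empty

def line_ids_to_block_range_py (line_ids : List Int) (kept_lines : List (List (String × Int))) : String :=
  if line_ids = [] ∨ kept_lines = [] then "" else
  let d := pvPosDict kept_lines
  let s : PySem.Set Int := line_ids.foldl
    (fun s lid => if d.contains lid then PySem.Set.add s (d.getD lid 0) else s) PySem.Set.empty
  let positions := PySem.List.sorted s (fun x => x) false
  if positions = [] then ""
  else pvFormatBlockRange (PySem.List.pyGetD positions 0 0) (PySem.List.pyGetD positions (-1) 0)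

-- ===== PORT B =====
def line_ids_to_block_range_py_alt (line_ids : List Int) (kept_lines : List (List (String × Int))) : String :=
  if line_ids = [] ∨ kept_lines = [] then "" else
  let d := pvPosDict kept_lines
  let r := line_ids.foldl
    (fun (acc : Option Int × Option Int) lid =>
      match d.get? lid with
      | none => acc
      | some pos =>
        ((match acc.1 with
          | none => some pos
          | some lo => if pos < lo then some pos else some lo),
         (match acc.2 with
          | none => some pos
          | some hi => if hi < pos then some pos else some hi)))
    (none, none)
  match r.1, r.2 with
  | some lo, some hi => pvFormatBlockRange lo hi
  | _, _ => ""

-- ===== PRECONDITION & SPEC =====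
-- Pre_ excludes exactly the inputs on which Python A raises KeyError: both lists nonempty
-- and some kept_lines item lacking the "line_id" key (B raises there too).
def Pre_line_ids_to_block_range_py (line_ids : List Int) (kept_lines : List (List (String × Int))) : Prop :=
  line_ids = [] ∨ kept_lines = [] ∨ ∀ item ∈ kept_lines, (PySem.Dict.mk item).contains "line_id" = true
instance (line_ids : List Int) (kept_lines : List (List (String × Int))) : Decidable (Pre_line_ids_to_block_range_py line_ids kept_lines) := by unfold Pre_line_ids_to_block_range_py; infer_instance

def pvWitness_line_ids_to_block_range_py : List Int × (List (List (String × Int))) :=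
  ([1, 2], [[("line_id", 2)], [("line_id", 1)]])

def Spec_line_ids_to_block_range_py (line_ids : List Int) (kept_lines : List (List (String × Int))) (out : String) : Prop := out = line_ids_to_block_range_py_alt line_ids kept_lines
instance (line_ids : List Int) (kept_lines : List (List (String × Int))) (out : String) : Decidable (Spec_line_ids_to_block_range_py line_ids kept_lines out) := by unfold Spec_line_ids_to_block_range_py; infer_instance

-- ===== CLAIM (what is proved, stated in full; the proofs are below) =====
def Claim_equal_line_ids_to_block_range_py : Prop := ∀ (line_ids : List Int) (kept_lines : List (List (String × Int))), Dom_line_ids_to_block_range_py line_ids kept_lines → Pre_line_ids_to_block_range_py line_ids kept_lines → Spec_line_ids_to_block_range_py line_ids kept_lines (line_ids_to_block_range_py line_ids kept_lines)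

-- ===== LEMMAS AND PROOFS =====

-- the positions actually found, in line_ids order (with repetitions)
def pvHits (line_ids : List Int) (d : PySem.Dict Int Int) : List Int :=
  line_ids.filterMap (fun lid => d.get? lid)

theorem pvFoldA (line_ids : List Int) (d : PySem.Dict Int Int) (s : PySem.Set Int) :
    line_ids.foldl (fun s lid => if d.contains lid then PySem.Set.add s (d.getD lid 0) else s) s
      = (pvHits line_ids d).foldl PySem.Set.add s := by
  induction line_ids generalizing s with
  | nil => rfl
  | cons lid t ih =>
    simp only [pvHits, List.filterMap_cons, List.foldl_cons]
    cases hq : d.get? lid with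
    | none =>
      have hc : d.contains lid = false := by
        have := (PySem.Dict.get?_eq_none_iff_contains (d := d) (k := lid))
        simp_all
      simp [hc, ih, pvHits]
    | some p =>
      have hc : d.contains lid = true := by
        have := (PySem.Dict.get?_eq_none_iff_contains (d := d) (k := lid))
        by_contra h
        simp_all
      have hg : d.getD lid 0 = p := by
        rw [PySem.Dict.getD_eq_get?_getD, hq]; rfl
      simp [hc, hg, ih, pvHits]

theorem pvFoldB (line_ids : List Int) (d : PySem.Dict Int Int) (acc : Option Int × Option Int) :
    line_ids.foldl
      (fun (acc : Option Int × Option Int) lid =>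
        match d.get? lid with
        | none => acc
        | some pos =>
          ((match acc.1 with
            | none => some pos
            | some lo => if pos < lo then some pos else some lo),
           (match acc.2 with
            | none => some pos
            | some hi => if hi < pos then some pos else some hi))) acc
    = (pvHits line_ids d).foldl
        (fun (acc : Option Int × Option Int) pos =>
          ((match acc.1 with
            | none => some pos
            | some lo => if pos < lo then some pos else some lo),
           (match acc.2 with
            | none => some pos
            | some hi => if hi < pos then some pos else some hi))) acc := by
  induction line_ids generalizing acc with
  | nil => rfl
  | cons lid t ih =>
    simp only [pvHits, List.filterMap_cons, List.foldl_cons]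
    cases hq : d.get? lid with
    | none => simpa [pvHits] using ih acc
    | some p => simpa [pvHits] using ih _

theorem pvFoldB_somes (t : List Int) (lo hi : Int) :
    t.foldl
        (fun (acc : Option Int × Option Int) pos =>
          ((match acc.1 with
            | none => some pos
            | some lo => if pos < lo then some pos else some lo),
           (match acc.2 with
            | none => some pos
            | some hi => if hi < pos then some pos else some hi))) (some lo, some hi)
    = (some (t.foldl min lo), some (t.foldl max hi)) := by
  induction t generalizing lo hi with
  | nil => rfl
  | cons a t ih =>
    simp only [List.foldl_cons]
    rw [show (if a < lo then some a else some lo) = some (min lo a) by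
          simp only [min_def]; split_ifs <;> simp <;> omega,
        show (if hi < a then some a else some hi) = some (max hi a) by
          simp only [max_def]; split_ifs <;> simp <;> omega]
    exact ih _ _

theorem pvFoldlMin_le (t : List Int) (p : Int) : ∀ x ∈ p :: t, t.foldl min p ≤ x := by
  induction t generalizing p with
  | nil =>
    intro x hx
    simp only [List.foldl_nil]
    rcases List.mem_cons.1 hx with rfl | h
    · exact le_refl _
    · simp at h
  | cons a t ih =>
    intro x hx
    simp only [List.foldl_cons]
    have h := ih (min p a)
    rcases List.mem_cons.1 hx with rfl | hx'
    · exact le_trans (h _ List.mem_cons_self) (min_le_left _ _)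
    · rcases List.mem_cons.1 hx' with rfl | hx''
      · exact le_trans (h _ List.mem_cons_self) (min_le_right _ _)
      · exact h _ (List.mem_cons_of_mem _ hx'')

theorem pvFoldlMin_mem (t : List Int) (p : Int) : t.foldl min p ∈ p :: t := by
  induction t generalizing p with
  | nil => simp
  | cons a t ih =>
    simp only [List.foldl_cons]
    have h := ih (min p a)
    rcases List.mem_cons.1 h with h' | h'
    · rw [h']; rcases min_cases p a with ⟨he, _⟩ | ⟨he, _⟩ <;> rw [he] <;> simp
    · simp [h']

theorem pvFoldlMax_ge (t : List Int) (p : Int) : ∀ x ∈ p :: t, x ≤ t.foldl max p := by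
  induction t generalizing p with
  | nil =>
    intro x hx
    simp only [List.foldl_nil]
    rcases List.mem_cons.1 hx with rfl | h
    · exact le_refl _
    · simp at h
  | cons a t ih =>
    intro x hx
    simp only [List.foldl_cons]
    have h := ih (max p a)
    rcases List.mem_cons.1 hx with rfl | hx'
    · exact le_trans (le_max_left _ _) (h _ List.mem_cons_self)
    · rcases List.mem_cons.1 hx' with rfl | hx''
      · exact le_trans (le_max_right _ _) (h _ List.mem_cons_self)
      · exact h _ (List.mem_cons_of_mem _ hx'')

theorem pvFoldlMax_mem (t : List Int) (p : Int) : t.foldl max p ∈ p :: t := by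
  induction t generalizing p with
  | nil => simp
  | cons a t ih =>
    simp only [List.foldl_cons]
    have h := ih (max p a)
    rcases List.mem_cons.1 h with h' | h'
    · rw [h']; rcases max_cases p a with ⟨he, _⟩ | ⟨he, _⟩ <;> rw [he] <;> simp
    · simp [h']

theorem pvPairwise_le_getLast : ∀ (l : List Int) (hl : l ≠ []),
    l.Pairwise (fun a b => a ≤ b) → ∀ x ∈ l, x ≤ l.getLast hl := by
  intro l
  induction l with
  | nil => intro hl; simp at hl
  | cons a t ih =>
    intro hl hp x hx
    cases t with
    | nil => simp_all
    | cons b t' =>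
      have hp' := List.pairwise_cons.1 hp
      rw [List.getLast_cons (by simp : b :: t' ≠ [])]
      rcases List.mem_cons.1 hx with rfl | hx'
      · exact hp'.1 _ (List.getLast_mem _)
      · exact ih (by simp) hp'.2 x hx'

theorem line_ids_to_block_range_py_eq (line_ids : List Int) (kept_lines : List (List (String × Int))) :
    line_ids_to_block_range_py line_ids kept_lines
      = line_ids_to_block_range_py_alt line_ids kept_lines := by
  unfold line_ids_to_block_range_py line_ids_to_block_range_py_alt
  by_cases hguard : line_ids = [] ∨ kept_lines = []
  · simp [hguard]
  · simp only [hguard, if_false]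
    set d := pvPosDict kept_lines with hd
    rw [pvFoldA line_ids d, pvFoldB line_ids d]
    set ps := pvHits line_ids d with hps
    cases hpsc : ps with
    | nil => simp [PySem.List.sorted_eq_nil_iff, PySem.Set.empty]
    | cons p t =>
      -- A side: sorted set
      have hfold : (p :: t).foldl PySem.Set.add PySem.Set.empty = PySem.Set.ofList (p :: t) :=
        (PySem.Set.ofList_eq_foldl _).symm
      rw [hfold]
      have hofne : PySem.Set.ofList (p :: t) ≠ [] := by
        intro h
        have : p ∈ PySem.Set.ofList (p :: t) := by
          rw [PySem.Set.mem_ofList]; exact List.mem_cons_self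
        simp [h] at this
      have hqne : PySem.List.sorted (PySem.Set.ofList (p :: t)) (fun x => x) false ≠ [] := by
        simp [PySem.List.sorted_eq_nil_iff, hofne]
      set q := PySem.List.sorted (PySem.Set.ofList (p :: t)) (fun x => x) false with hq
      cases hqc : q with
      | nil => exact absurd hqc hqne
      | cons m tq =>
        -- B side
        rw [show ((p :: t).foldl
            (fun (acc : Option Int × Option Int) pos =>
              ((match acc.1 with
                | none => some pos
                | some lo => if pos < lo then some pos else some lo),
               (match acc.2 with
                | none => some pos
                | some hi => if hi < pos then some pos else some hi))) (none, none))
            = (t.foldl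
                (fun (acc : Option Int × Option Int) pos =>
                  ((match acc.1 with
                    | none => some pos
                    | some lo => if pos < lo then some pos else some lo),
                   (match acc.2 with
                    | none => some pos
                    | some hi => if hi < pos then some pos else some hi))) (some p, some p)) from rfl]
        rw [pvFoldB_somes]
        -- extremes agree
        have hmem_q : ∀ x, x ∈ q ↔ x ∈ p :: t := by
          intro x
          rw [hq, PySem.List.mem_sorted, PySem.Set.mem_ofList]
        have hmlow : ∀ y ∈ p :: t, m ≤ y := by
          intro y hy
          have := PySem.List.key_head_sorted_le (xs := PySem.Set.ofList (p :: t))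
            (key := fun x => x) (m := m) (t := tq) (hq ▸ hqc)
          exact this y ((PySem.Set.mem_ofList _ _).2 hy)
        have hmmem : m ∈ p :: t := (hmem_q m).1 (by rw [hqc]; exact List.mem_cons_self)
        have hlo : t.foldl min p = m := by
          have h1 := pvFoldlMin_le t p m hmmem
          have h2 := hmlow _ (pvFoldlMin_mem t p)
          omega
        have hpq : q.Pairwise (fun a b => a ≤ b) := by
          have := PySem.List.sorted_pairwise (xs := PySem.Set.ofList (p :: t)) (key := fun x => x)
          simpa [hq] using this
        have hlast_mem : q.getLast hqne ∈ p :: t := (hmem_q _).1 (List.getLast_mem _)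
        have hlast_ge : ∀ x ∈ p :: t, x ≤ q.getLast hqne := by
          intro x hx
          exact pvPairwise_le_getLast q hqne hpq x ((hmem_q x).2 hx)
        have hhi : t.foldl max p = q.getLast hqne := by
          have h1 := pvFoldlMax_ge t p _ hlast_mem
          have h2 := hlast_ge _ (pvFoldlMax_mem t p)
          omega
        have hget0 : PySem.List.pyGetD q 0 0 = m := by rw [hqc]; simp [PySem.List.pyGetD_zero_cons]
        have hgetlast : PySem.List.pyGetD q (-1) 0 = q.getLast hqne :=
          PySem.List.pyGetD_neg_one (xs := q) hqne (d := 0)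
        simp only [← hqc, hget0, hgetlast, hlo, hhi, if_neg hqne]

-- ===== VERDICT (by name: the statement is the Claim_ definition above) =====
theorem line_ids_to_block_range_py_spec : Claim_equal_line_ids_to_block_range_py := by
  intro line_ids kept_lines _ _
  unfold Spec_line_ids_to_block_range_py
  exact line_ids_to_block_range_py_eq line_ids kept_lines
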